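-- pv_equiv track=rewrite | github.com/thomsn/deepen | deepen.py | find_updates
-- ===== SOURCE A (Python) =====
-- def find_updates(version, all_versions):
--     updates = []
--     for ver in all_versions:
--         if ver['name'] == version:
--             break
--         updates.append(ver)
--     if len(updates) == len(all_versions): # if the version is not in versions
--         return []
--     else:
--         return updates
-- ===== SOURCE B (Python) =====
-- def find_updates(version, all_versions):
--     for i, ver in enumerate(all_versions):
--         if ver['name'] == version:
--             return all_versions[:i]
--     return []
-- ===== Notes on version B (the rewrite author's own statement) =====
-- stated objective: simpler
-- what changed: B locates the first matching index with enumerate and returns a slice of the input, instead of accumulating a prefix element-by-element and comparing its length to the whole list as a no-match sentinel.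
import Mathlib
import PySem

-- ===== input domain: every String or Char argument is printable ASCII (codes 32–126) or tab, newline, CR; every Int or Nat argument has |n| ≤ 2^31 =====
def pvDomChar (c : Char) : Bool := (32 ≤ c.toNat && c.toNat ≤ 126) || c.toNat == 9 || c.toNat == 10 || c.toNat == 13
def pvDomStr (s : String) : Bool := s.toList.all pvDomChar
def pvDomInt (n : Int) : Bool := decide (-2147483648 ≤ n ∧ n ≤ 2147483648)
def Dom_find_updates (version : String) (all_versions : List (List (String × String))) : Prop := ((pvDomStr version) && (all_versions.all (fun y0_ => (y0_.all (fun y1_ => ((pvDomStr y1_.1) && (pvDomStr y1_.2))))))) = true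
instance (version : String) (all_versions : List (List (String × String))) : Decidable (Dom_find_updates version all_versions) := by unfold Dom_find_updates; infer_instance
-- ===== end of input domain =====

-- B finds the first matching index and returns a slice, instead of A's element-by-element
-- prefix accumulation with a length-comparison sentinel for the no-match case (objective: simpler).

-- shared primitive: ver['name'] — first-match lookup in the association list (none = KeyError)
def pvName? : List (String × String) → Option String
  | [] => none
  | (k, v) :: rest => if k == "name" then some v else pvName? rest

-- ===== PORT A =====
-- the for-loop with break: accumulates `updates` until the first match; the `none` branch
-- (missing 'name' key) is a KeyError in Python, excluded by Pre_find_updates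
def pvLoopA (version : String) : List (List (String × String)) → List (List (String × String)) → List (List (String × String))
  | [], updates => updates
  | ver :: rest, updates =>
    match pvName? ver with
    | none => updates
    | some n => if n == version then updates else pvLoopA version rest (updates ++ [ver])

def find_updates (version : String) (all_versions : List (List (String × String))) : List (List (String × String)) :=
  let updates := pvLoopA version all_versions []
  if updates.length == all_versions.length then [] else updates

-- ===== PORT B =====
def find_updates_alt (version : String) (all_versions : List (List (String × String))) : List (List (String × String)) :=
  match all_versions.findIdx? (fun ver => pvName? ver == some version) with
  | some i => all_versions.take i
  | none => []

-- ===== PRECONDITION & SPEC =====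
-- Pre_ excludes exactly the inputs on which Python A (and Python B) raise KeyError:
-- some element scanned before the first match lacks a 'name' key.
def Pre_find_updates (version : String) (all_versions : List (List (String × String))) : Prop :=
  ∀ d ∈ all_versions.takeWhile (fun ver => !(ver.lookup "name" == some version)), (d.lookup "name").isSome

instance (version : String) (all_versions : List (List (String × String))) : Decidable (Pre_find_updates version all_versions) := by unfold Pre_find_updates; infer_instance

def pvWitness_find_updates : String × (List (List (String × String))) :=
  ("1.0", [[("name", "0.9")], [("name", "1.0")], [("x", "y")]])

def Spec_find_updates (version : String) (all_versions : List (List (String × String))) (out : List (List (String × String))) : Prop := out = find_updates_alt version all_versions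
instance (version : String) (all_versions : List (List (String × String))) (out : List (List (String × String))) : Decidable (Spec_find_updates version all_versions out) := by unfold Spec_find_updates; infer_instance

-- ===== CLAIM (what is proved, stated in full; the proofs are below) =====
def Claim_equal_find_updates : Prop := ∀ (version : String) (all_versions : List (List (String × String))), Dom_find_updates version all_versions → Pre_find_updates version all_versions → Spec_find_updates version all_versions (find_updates version all_versions)

-- ===== LEMMAS AND PROOFS =====

-- the ports' hand-written first-match lookup is the standard association-list lookup
lemma pvName?_eq_lookup (d : List (String × String)) : pvName? d = d.lookup "name" := by
  induction d with
  | nil => rfl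
  | cons p rest ih =>
    obtain ⟨k, v⟩ := p
    by_cases h : k = "name"
    · simp [pvName?, List.lookup, h, ih]
    · have h2 : ("name" == k) = false := by simp [Ne.symm h]
      simp [pvName?, List.lookup, h, h2, ih]

-- the accumulator is a pure prefix
lemma pvLoopA_acc (version : String) (avs : List (List (String × String))) :
    ∀ acc, pvLoopA version avs acc = acc ++ pvLoopA version avs [] := by
  induction avs with
  | nil => intro acc; simp [pvLoopA]
  | cons ver rest ih =>
    intro acc
    simp only [pvLoopA]
    cases pvName? ver with
    | none => simp
    | some n =>
      by_cases h : n == version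
      · simp [h]
      · simp only [h, if_neg, Bool.false_eq_true, not_false_eq_true, if_neg]
        rw [ih (acc ++ [ver]), ih ([] ++ [ver])]
        simp

-- under Pre_, A's loop result is characterised by the first matching index
lemma pvLoopA_char (version : String) :
    ∀ avs : List (List (String × String)), Pre_find_updates version avs →
      (match avs.findIdx? (fun ver => pvName? ver == some version) with
       | some i => pvLoopA version avs [] = avs.take i ∧ i < avs.length
       | none => pvLoopA version avs [] = avs) := by
  intro avs
  induction avs with
  | nil => intro _; simp [pvLoopA]
  | cons ver rest ih =>
    intro hpre
    by_cases hm : (pvName? ver == some version) = true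
    · simp only [List.findIdx?_cons, hm, if_pos]
      have : pvName? ver = some version := by
        cases h : pvName? ver with
        | none => simp [h] at hm
        | some v => simp [h] at hm; simp [hm]
      constructor
      · simp [pvLoopA, this]
      · simp
    · -- head does not match; Pre_ forces it to have a 'name' key
      have hkey : (pvName? ver).isSome := by
        rw [pvName?_eq_lookup]
        apply hpre
        simp [← pvName?_eq_lookup, hm]
      have hpre' : Pre_find_updates version rest := by
        intro d hd
        simp only [← pvName?_eq_lookup] at hd
        apply hpre
        simp [← pvName?_eq_lookup, hm]
        exact Or.inr hd
      cases hv : pvName? ver with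
      | none => simp [hv] at hkey
      | some n =>
        have hne : (n == version) = false := by
          by_contra hcon
          have : (n == version) = true := by
            cases h2 : (n == version) <;> simp_all
          apply hm; simp [hv, this]
        have hstep : pvLoopA version (ver :: rest) [] = ver :: pvLoopA version rest [] := by
          simp only [pvLoopA, hv, hne, Bool.false_eq_true, if_neg, not_false_eq_true]
          rw [pvLoopA_acc]
          simp
        have := ih hpre'
        simp only [List.findIdx?_cons, hm, if_neg, Bool.false_eq_true, not_false_eq_true]
        cases hfi : rest.findIdx? (fun ver => pvName? ver == some version) with
        | none =>
          simp only [hfi] at this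
          simp [hstep, this]
        | some i =>
          simp only [hfi] at this
          simp [hstep, this.1, List.take_succ_cons, this.2]

-- ===== VERDICT (by name: the statement is the Claim_ definition above) =====
theorem find_updates_spec : Claim_equal_find_updates := by
  intro version avs _ hpre
  unfold Spec_find_updates find_updates find_updates_alt
  have h := pvLoopA_char version avs hpre
  cases hfi : avs.findIdx? (fun ver => pvName? ver == some version) with
  | none =>
    simp only [hfi] at h
    simp [h]
  | some i =>
    simp only [hfi] at h
    obtain ⟨h1, h2⟩ := h
    simp [h1]
    intro hle
    omega
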